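-- pv_equiv track=rewrite | github.com/siege-green/esihub | esihub/utils.py | parse_path_params
-- ===== SOURCE A (Python) =====
-- from typing import Dict, Any, Callable
--
-- def parse_path_params(path: str) -> Dict[str, Any]:
--     params = {}
--     parts = path.split("/")
--     for part in parts:
--         if part.startswith("{") and part.endswith("}"):
--             param_name = part[1:-1]
--             params[param_name] = None
--     return params
-- ===== SOURCE B (Python) =====
-- def parse_path_params(path):
--     params = {}
--     seg = ""
--     for ch in path + "/":
--         if ch == "/":
--             if len(seg) >= 2 and seg[0] == "{" and seg[-1] == "}":
--                 params[seg[1:-1]] = None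
--             seg = ""
--         else:
--             seg += ch
--     return params
-- ===== Notes on version B (the rewrite author's own statement) =====
-- stated objective: alternative
-- what changed: Replaces the split-then-loop over path parts (startswith/endswith test on each part) with a single character-by-character scan that accumulates the current segment and checks its first and last characters at each separator boundary.
import Mathlib
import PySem

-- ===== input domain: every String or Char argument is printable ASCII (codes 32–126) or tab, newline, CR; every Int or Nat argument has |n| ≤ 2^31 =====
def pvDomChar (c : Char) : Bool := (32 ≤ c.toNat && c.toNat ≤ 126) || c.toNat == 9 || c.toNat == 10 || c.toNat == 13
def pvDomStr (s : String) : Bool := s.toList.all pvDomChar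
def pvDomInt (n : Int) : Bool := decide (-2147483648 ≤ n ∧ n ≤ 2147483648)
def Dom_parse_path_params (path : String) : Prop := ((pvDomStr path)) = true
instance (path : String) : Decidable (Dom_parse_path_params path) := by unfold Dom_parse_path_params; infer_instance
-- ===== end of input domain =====

-- B replaces split('/') + a startswith/endswith loop over parts by a single character scan
-- that accumulates the current segment and checks it at each '/' boundary (alternative, same cost).

-- ===== PORT A =====
-- A: params = {}; for part in path.split("/"): if part.startswith("{") and part.endswith("}"):
--      params[part[1:-1]] = None; return params
def pppStepA (d : PySem.Dict String (Option Int)) (part : List Char) : PySem.Dict String (Option Int) :=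
  if PySem.Chars.startswith part ['{'] && PySem.Chars.endswith part ['}'] then
    d.insert (String.ofList (PySem.Chars.slice part (some 1) (some (-1)))) none
  else d

def parse_path_params (path : String) : List (String × Option Int) :=
  ((PySem.Chars.splitOn path.toList ['/']).foldl pppStepA PySem.Dict.empty).items

-- ===== PORT B =====
-- B: one pass over path + "/": build the current segment char by char; at each '/',
-- if len(seg) >= 2 and seg[0] == '{' and seg[-1] == '}', insert seg[1:-1].
def pppStepB (st : PySem.Dict String (Option Int) × List Char) (ch : Char) :
    PySem.Dict String (Option Int) × List Char :=
  if ch = '/' then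
    (if decide (2 ≤ st.2.length) && (PySem.List.pyGet? st.2 0 == some '{')
        && (PySem.List.pyGet? st.2 (-1) == some '}') then
       (st.1.insert (String.ofList (PySem.List.slice st.2 (some 1) (some (-1)))) none, [])
     else (st.1, []))
  else (st.1, st.2 ++ [ch])

def parse_path_params_alt (path : String) : List (String × Option Int) :=
  (((path.toList ++ ['/']).foldl pppStepB (PySem.Dict.empty, [])).1).items

-- ===== PRECONDITION & SPEC =====
def Spec_parse_path_params (path : String) (out : List (String × Option Int)) : Prop := out = parse_path_params_alt path
instance (path : String) (out : List (String × Option Int)) : Decidable (Spec_parse_path_params path out) := by unfold Spec_parse_path_params; infer_instance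

-- ===== CLAIM (what is proved, stated in full; the proofs are below) =====
def Claim_equal_parse_path_params : Prop := ∀ (path : String), Dom_parse_path_params path → Spec_parse_path_params path (parse_path_params path)

-- ===== LEMMAS AND PROOFS =====

-- structural characterisation of the '/'-segments of a character list
def pppSegs : List Char → List Char × List (List Char)
  | [] => ([], [])
  | c :: rest =>
    let s := pppSegs rest
    if c = '/' then ([], s.1 :: s.2) else (c :: s.1, s.2)

theorem pppSplitOn_go (fuel : Nat) (l cur : List Char) (acc : List (List Char))
    (h : l.length ≤ fuel) :
    PySem.Chars.splitOn.go ['/'] fuel l cur acc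
      = acc.reverse ++ (cur.reverse ++ (pppSegs l).1) :: (pppSegs l).2 := by
  induction fuel generalizing l cur acc with
  | zero =>
    interval_cases hl : l.length
    rw [List.length_eq_zero_iff] at hl
    subst hl
    simp [PySem.Chars.splitOn.go, pppSegs]
  | succ n ih =>
    cases l with
    | nil => simp [PySem.Chars.splitOn.go, pppSegs]
    | cons c rest =>
      by_cases hc : c = '/'
      · subst hc
        rw [show PySem.Chars.splitOn.go ['/'] (n+1) ('/' :: rest) cur acc
              = PySem.Chars.splitOn.go ['/'] n rest [] (cur.reverse :: acc) by
            simp [PySem.Chars.splitOn.go, List.isPrefixOf]]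
        rw [ih rest [] (cur.reverse :: acc) (by simpa using Nat.lt_succ_iff.mp (by simpa using h))]
        simp [pppSegs]
      · rw [show PySem.Chars.splitOn.go ['/'] (n+1) (c :: rest) cur acc
              = PySem.Chars.splitOn.go ['/'] n rest (c :: cur) acc by
            simp [PySem.Chars.splitOn.go, List.isPrefixOf, Ne.symm hc]]
        rw [ih rest (c :: cur) acc (by simpa using Nat.lt_succ_iff.mp (by simpa using h))]
        simp [pppSegs, hc]

theorem pppSplitOn_eq (cs : List Char) :
    PySem.Chars.splitOn cs ['/'] = (pppSegs cs).1 :: (pppSegs cs).2 := by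
  rw [PySem.Chars.splitOn, pppSplitOn_go (cs.length + 1) cs [] [] (by omega)]
  simp

-- the boundary check of B coincides with A's startswith/endswith test on a whole segment
theorem pppStepB_slash (d : PySem.Dict String (Option Int)) (seg : List Char) :
    pppStepB (d, seg) '/' = (pppStepA d seg, []) := by
  unfold pppStepB pppStepA
  match seg with
  | [] => simp [PySem.Chars.startswith, List.isPrefixOf]
  | [a] =>
    by_cases ha : a = '{'
    · subst ha
      simp [show PySem.Chars.endswith ['{'] ['}'] = false from by decide]
    · have hsw : PySem.Chars.startswith [a] ['{'] = false := by
        rw [Bool.eq_false_iff]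
        intro h
        rcases (PySem.Chars.startswith_iff [a] ['{']).mp h with ⟨s, hs⟩
        cases s with
        | nil =>
          simp only [List.append_nil, List.cons.injEq] at hs
          exact ha hs.1.symm
        | cons x xs => simp at hs
      simp [hsw]
  | a :: b :: t =>
    have h2 : (2:Nat) ≤ (a :: b :: t).length := by simp
    have hget0 : PySem.List.pyGet? (a :: b :: t) 0 = some a := by
      simp [PySem.List.pyGet?_zero]
    have hgetl : PySem.List.pyGet? (a :: b :: t) (-1) = (a :: b :: t).getLast? := by
      simpa using PySem.List.pyGet?_neg_one (a :: b :: t)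
    have hsw : PySem.Chars.startswith (a :: b :: t) ['{'] = (a == '{') := by
      by_cases h1 : a = '{'
      · subst h1
        simp [PySem.Chars.startswith, List.isPrefixOf]
      · simp [PySem.Chars.startswith, List.isPrefixOf, h1, Ne.symm h1]
    have he : PySem.Chars.endswith (a :: b :: t) ['}'] = true
        ↔ (a :: b :: t).getLast? = some '}' := by
      rw [PySem.Chars.endswith_iff]
      constructor
      · rintro ⟨pre, hpre⟩
        rw [← hpre]
        simp [List.getLast?_append]
      · intro hl
        refine ⟨(a :: b :: t).dropLast, ?_⟩
        have hne : (a :: b :: t) ≠ [] := by simp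
        have := List.dropLast_concat_getLast hne
        rw [List.getLast?_eq_some_getLast hne] at hl
        simp only [Option.some.injEq] at hl
        rw [hl] at this
        exact this
    have hew : PySem.Chars.endswith (a :: b :: t) ['}']
        = ((a :: b :: t).getLast? == some '}') := by
      by_cases hl : (a :: b :: t).getLast? = some '}'
      · rw [he.mpr hl, hl]
        simp
      · rw [show ((a :: b :: t).getLast? == some '}') = false from beq_eq_false_iff_ne.mpr hl]
        rw [Bool.eq_false_iff]
        intro hh
        exact hl (he.mp hh)
    rw [hsw, hew, hget0, hgetl, decide_eq_true h2]
    by_cases h1 : a = '{' <;> by_cases hl : (a :: b :: t).getLast? = some '}' <;>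
      (simp [h1, hl, PySem.Chars.slice_eq_listSlice]; try (split <;> rfl))

-- B's scan over cs ++ ['/'] starting with pending segment seg computes A's fold over the segments
theorem pppScan_eq (cs : List Char) (d : PySem.Dict String (Option Int)) (seg : List Char) :
    ((cs ++ ['/']).foldl pppStepB (d, seg)).1
      = ((seg ++ (pppSegs cs).1) :: (pppSegs cs).2).foldl pppStepA d := by
  induction cs generalizing d seg with
  | nil => simp [pppSegs, pppStepB_slash]
  | cons c rest ih =>
    by_cases hc : c = '/'
    · subst hc
      simp only [List.cons_append, List.foldl_cons, pppStepB_slash]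
      rw [ih (pppStepA d seg) []]
      simp [pppSegs]
    · simp only [List.cons_append, List.foldl_cons,
        show pppStepB (d, seg) c = (d, seg ++ [c]) from by simp [pppStepB, hc]]
      rw [ih d (seg ++ [c])]
      simp [pppSegs, hc]

-- ===== VERDICT (by name: the statement is the Claim_ definition above) =====
theorem parse_path_params_spec : Claim_equal_parse_path_params := by
  intro path _
  unfold Spec_parse_path_params parse_path_params parse_path_params_alt
  rw [pppSplitOn_eq, pppScan_eq]
  simp
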